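-- pv_equiv track=rewrite | github.com/ingvast/SM | ai/sm-builder.py | get_exit_sequence
-- ===== SOURCE A (Python) =====
-- def flatten_c_name(path):
--     return "_".join(path)
--
-- def get_exit_sequence(source_path, target_path):
--     lca_index = 0
--     min_len = min(len(source_path), len(target_path))
--     while lca_index < min_len:
--         if source_path[lca_index] != target_path[lca_index]:
--             break
--         lca_index += 1
--     exits = []
--     for i in range(len(source_path) - 1, lca_index - 1, -1):
--         state_segment = source_path[:i+1]
--         c_name = flatten_c_name(state_segment)
--         exits.append(f"state_{c_name}_exit")
--     return exits
-- ===== SOURCE B (Python) =====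
-- def get_exit_sequence(source_path, target_path):
--     # depth of the lowest common ancestor: count equal leading pairs
--     lca = 0
--     for a, b in zip(source_path, target_path):
--         if a != b:
--             break
--         lca += 1
--     # extend the joined prefix name by one segment per level instead of
--     # re-joining the whole prefix at every level
--     acc = "_".join(source_path[:lca])
--     exits = []
--     for i in range(lca, len(source_path)):
--         seg = source_path[i]
--         acc = seg if i == 0 else acc + "_" + seg
--         exits.append("state_" + acc + "_exit")
--     exits.reverse()
--     return exits
-- ===== Notes on version B (the rewrite author's own statement) =====
-- stated objective: alternative
-- what changed: B computes the LCA depth by zipping the two paths (instead of an index-based while loop) and builds each exit name by extending the previously joined prefix name with one segment in a single forward pass, reversing at the end, instead of re-joining the whole prefix slice for every level in a backward index loop.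
import Mathlib
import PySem

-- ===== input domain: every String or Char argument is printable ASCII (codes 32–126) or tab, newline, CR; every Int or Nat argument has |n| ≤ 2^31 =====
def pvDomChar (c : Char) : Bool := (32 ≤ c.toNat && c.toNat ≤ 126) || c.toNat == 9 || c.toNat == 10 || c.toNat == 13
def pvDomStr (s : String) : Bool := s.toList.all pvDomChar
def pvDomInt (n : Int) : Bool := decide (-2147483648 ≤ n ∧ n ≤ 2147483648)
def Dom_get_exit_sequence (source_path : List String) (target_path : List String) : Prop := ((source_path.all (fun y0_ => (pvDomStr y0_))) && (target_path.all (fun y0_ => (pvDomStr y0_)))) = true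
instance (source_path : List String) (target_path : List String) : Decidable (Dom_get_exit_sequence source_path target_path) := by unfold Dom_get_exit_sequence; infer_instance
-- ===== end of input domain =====

-- B counts the common prefix by zipping the paths and extends the joined prefix
-- name one segment at a time instead of re-joining the whole prefix per level;
-- objective: alternative (the output itself is quadratic-size, so cost is similar).


-- ===== PORT A =====
def flatten_c_name (path : List String) : String := PySem.Str.join "_" path

-- A's while loop advancing lca_index (indices are always in range: i < min_len)
def lcaLoop (source_path target_path : List String) (min_len i : Nat) : Nat :=
  if i < min_len then
    if PySem.List.pyGetD source_path (i : Int) "" ≠ PySem.List.pyGetD target_path (i : Int) "" then i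
    else lcaLoop source_path target_path min_len (i + 1)
  else i
termination_by min_len - i

def get_exit_sequence (source_path : List String) (target_path : List String) : List String :=
  let min_len := min source_path.length target_path.length
  let lca_index := lcaLoop source_path target_path min_len 0
  (PySem.List.pyRange ((source_path.length : Int) - 1) ((lca_index : Int) - 1) (-1)).foldl
    (fun exits i =>
      let state_segment := PySem.List.slice source_path none (some (i + 1))
      let c_name := flatten_c_name state_segment
      exits ++ ["state_" ++ c_name ++ "_exit"]) []

-- ===== PORT B =====
-- B's first loop: zip the two paths, break on first mismatch, counting matches
def lcaZip : List String → List String → Nat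
  | a :: as, b :: bs => if a = b then lcaZip as bs + 1 else 0
  | _, _ => 0

-- B's second loop: extend the joined prefix name by one segment per level,
-- appending one formatted exit name per level; reversed at the end
def get_exit_sequence_alt (source_path : List String) (target_path : List String) : List String :=
  let lca := lcaZip source_path target_path
  let acc0 := PySem.Str.join "_" (PySem.List.slice source_path none (some (lca : Int)))
  let st := (PySem.List.pyRange (lca : Int) ((source_path.length : Int)) 1).foldl
    (fun st i =>
      let seg := PySem.List.pyGetD source_path i ""
      let acc := if i = 0 then seg else st.2 ++ "_" ++ seg
      (st.1 ++ ["state_" ++ acc ++ "_exit"], acc)) ([], acc0)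
  st.1.reverse

-- ===== PRECONDITION & SPEC =====
def Spec_get_exit_sequence (source_path : List String) (target_path : List String) (out : List String) : Prop := out = get_exit_sequence_alt source_path target_path
instance (source_path : List String) (target_path : List String) (out : List String) : Decidable (Spec_get_exit_sequence source_path target_path out) := by unfold Spec_get_exit_sequence; infer_instance

-- ===== CLAIM (what is proved, stated in full; the proofs are below) =====
def Claim_equal_get_exit_sequence : Prop := ∀ (source_path : List String) (target_path : List String), Dom_get_exit_sequence source_path target_path → Spec_get_exit_sequence source_path target_path (get_exit_sequence source_path target_path)

-- ===== LEMMAS AND PROOFS =====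

-- join over an appended last segment (nonempty prefix)
theorem chars_join_append (sep s : List Char) : ∀ (p : List (List Char)), p ≠ [] →
    PySem.Chars.join sep (p ++ [s]) = PySem.Chars.join sep p ++ sep ++ s
  | [], h => absurd rfl h
  | [q], _ => by
      simp [PySem.Chars.join_cons_cons, PySem.Chars.join_singleton]
  | q :: r :: rest, _ => by
      have ih := chars_join_append sep s (r :: rest) (by simp)
      simp only [List.cons_append] at ih ⊢
      rw [PySem.Chars.join_cons_cons, PySem.Chars.join_cons_cons, ih]
      simp [List.append_assoc]

theorem str_join_append (p : List String) (s : String) (hp : p ≠ []) :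
    PySem.Str.join "_" (p ++ [s]) = PySem.Str.join "_" p ++ "_" ++ s := by
  apply String.toList_inj.mp
  simp only [PySem.Str.toList_join, String.toList_append, List.map_append, List.map_cons,
    List.map_nil]
  exact chars_join_append _ _ _ (by simpa using hp)

theorem str_join_singleton (s : String) : PySem.Str.join "_" [s] = s := by
  apply String.toList_inj.mp
  simp [PySem.Str.toList_join, PySem.Chars.join_singleton]

-- one more segment under the join (nonempty prefix)
theorem take_succ_join (src : List String) (j : Nat) (h1 : 1 ≤ j) (h2 : j < src.length) :
    PySem.Str.join "_" (src.take (j + 1))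
      = PySem.Str.join "_" (src.take j) ++ "_" ++ src.getD j "" := by
  rw [List.take_add_one, List.getElem?_eq_getElem h2, Option.toList_some,
    List.getD_eq_getElem src "" h2]
  exact str_join_append _ _ (by
    intro h
    have := congrArg List.length h
    simp [List.length_take, Nat.min_eq_left (Nat.le_of_lt h2)] at this
    omega)

-- the invariant of B's forward pass
theorem altLoop (src : List String) :
    ∀ (d j : Nat) (exits : List String), 1 ≤ j → j + d = src.length →
    (PySem.List.pyRange (j : Int) ((src.length : Int)) 1).foldl
      (fun st i =>
        let seg := PySem.List.pyGetD src i ""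
        let acc := if i = 0 then seg else st.2 ++ "_" ++ seg
        (st.1 ++ ["state_" ++ acc ++ "_exit"], acc))
      (exits, PySem.Str.join "_" (src.take j))
    = (exits ++ (List.range d).map
         (fun k => "state_" ++ PySem.Str.join "_" (src.take (j + k + 1)) ++ "_exit"),
       PySem.Str.join "_" src) := by
  intro d
  induction d with
  | zero =>
    intro j exits h1 h2
    rw [PySem.List.pyRange_one_eq_nil (by exact_mod_cast (by omega : src.length ≤ j)),
      List.foldl_nil, show j = src.length by omega, List.take_length]
    simp
  | succ d ih =>
    intro j exits h1 h2
    rw [PySem.List.pyRange_one_cons (by exact_mod_cast (by omega : j < src.length)),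
      List.foldl_cons]
    dsimp only
    rw [if_neg (by exact_mod_cast (by omega : ¬ j = 0)), PySem.List.pyGetD_natCast,
      ← take_succ_join src j h1 (by omega)]
    have hcast : ((j : Int) + 1) = (((j + 1 : Nat)) : Int) := by push_cast; ring
    have ih' := ih (j + 1) (exits ++ ["state_" ++ PySem.Str.join "_" (src.take (j + 1)) ++ "_exit"])
      (by omega) (by omega)
    dsimp only at ih'
    rw [hcast, ih']
    have hmap : (List.range (d + 1)).map
          (fun k => "state_" ++ PySem.Str.join "_" (src.take (j + k + 1)) ++ "_exit")
        = ("state_" ++ PySem.Str.join "_" (src.take (j + 1)) ++ "_exit")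
            :: (List.range d).map
                (fun k => "state_" ++ PySem.Str.join "_" (src.take (j + 1 + k + 1)) ++ "_exit") := by
      rw [List.range_succ_eq_map, List.map_cons, List.map_map]
      apply congrArg₂ List.cons
      · simp
      · apply List.map_congr_left
        intro k hk
        simp only [Function.comp_apply, Nat.succ_eq_add_one]
        rw [show j + (k + 1) + 1 = j + 1 + k + 1 by omega]
    rw [hmap, List.append_assoc, List.singleton_append]

-- shifting A's while loop by one matched pair
theorem lcaLoop_succ (a b : String) (src tgt : List String) :
    ∀ (m i : Nat), lcaLoop (a :: src) (b :: tgt) (m + 1) (i + 1) = lcaLoop src tgt m i + 1 := by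
  intro m i
  induction h : m - i generalizing i with
  | zero =>
    rw [lcaLoop, if_neg (show ¬ i + 1 < m + 1 by omega)]
    conv_rhs => rw [lcaLoop]
    rw [if_neg (show ¬ i < m by omega)]
  | succ n ih =>
    rw [lcaLoop, if_pos (show i + 1 < m + 1 by omega)]
    conv_rhs => rw [lcaLoop]
    rw [if_pos (show i < m by omega)]
    have hs : PySem.List.pyGetD (a :: src) (((i + 1 : Nat) : Int)) "" =
        PySem.List.pyGetD src ((i : Nat) : Int) "" := by
      rw [PySem.List.pyGetD_natCast, PySem.List.pyGetD_natCast]; rfl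
    have ht : PySem.List.pyGetD (b :: tgt) (((i + 1 : Nat) : Int)) "" =
        PySem.List.pyGetD tgt ((i : Nat) : Int) "" := by
      rw [PySem.List.pyGetD_natCast, PySem.List.pyGetD_natCast]; rfl
    rw [hs, ht]
    by_cases hc : PySem.List.pyGetD src ((i : Nat) : Int) "" ≠ PySem.List.pyGetD tgt ((i : Nat) : Int) ""
    · rw [if_pos hc, if_pos hc]
    · rw [if_neg hc, if_neg hc]
      exact ih (i + 1) (by omega)

theorem lca_eq : ∀ (src tgt : List String),
    lcaLoop src tgt (min src.length tgt.length) 0 = lcaZip src tgt := by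
  intro src
  induction src with
  | nil => intro tgt; rw [lcaLoop]; simp [lcaZip]
  | cons a as ih =>
    intro tgt
    cases tgt with
    | nil => rw [lcaLoop]; simp [lcaZip]
    | cons b bs =>
      rw [lcaLoop, if_pos (show 0 < min (a :: as).length (b :: bs).length by simp)]
      have hga : PySem.List.pyGetD (a :: as) (((0 : Nat) : Int)) "" = a := by
        rw [PySem.List.pyGetD_natCast]; rfl
      have hgb : PySem.List.pyGetD (b :: bs) (((0 : Nat) : Int)) "" = b := by
        rw [PySem.List.pyGetD_natCast]; rfl
      rw [hga, hgb]
      have hmin : min (a :: as).length (b :: bs).length = min as.length bs.length + 1 := by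
        simp [Nat.succ_min_succ]
      by_cases hab : a = b
      · rw [if_neg (by simp [hab]), hmin, lcaLoop_succ, ih bs]
        simp [lcaZip, hab]
      · rw [if_pos (by simp [hab])]
        simp [lcaZip, hab]

theorem lcaZip_le (src : List String) : ∀ tgt, lcaZip src tgt ≤ src.length := by
  induction src with
  | nil => intro tgt; cases tgt <;> simp [lcaZip]
  | cons a as ih =>
    intro tgt
    cases tgt with
    | nil => simp [lcaZip]
    | cons b bs =>
      rw [lcaZip]
      split
      · have := ih bs; simp; omega
      · simp

-- ===== VERDICT (by name: the statement is the Claim_ definition above) =====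
theorem get_exit_sequence_spec : Claim_equal_get_exit_sequence := by
  intro src tgt _
  unfold Spec_get_exit_sequence get_exit_sequence get_exit_sequence_alt
  dsimp only
  rw [lca_eq]
  set lca := lcaZip src tgt with hlca
  have hle : lca ≤ src.length := by rw [hlca]; exact lcaZip_le src tgt
  clear_value lca
  clear hlca
  rw [PySem.List.foldl_append_singleton_eq_map
        (fun i => "state_" ++ flatten_c_name (PySem.List.slice src none (some (i + 1))) ++ "_exit")]
  rw [PySem.List.pyRange_neg_one_eq_reverse,
    show ((lca : Int) - 1 + 1) = (lca : Int) by ring,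
    show ((src.length : Int) - 1 + 1) = (src.length : Int) by ring]
  rw [List.map_reverse, List.nil_append]
  congr 1
  have hA : (PySem.List.pyRange (lca : Int) ((src.length : Int)) 1).map
        (fun i => "state_" ++ flatten_c_name (PySem.List.slice src none (some (i + 1))) ++ "_exit")
      = (List.range (src.length - lca)).map
          (fun k => "state_" ++ PySem.Str.join "_" (src.take (lca + k + 1)) ++ "_exit") := by
    rw [PySem.List.pyRange_one, List.map_map,
      show ((src.length : Int) - (lca : Int)).toNat = src.length - lca by omega]
    apply List.map_congr_left
    intro k hk
    simp only [Function.comp_apply]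
    have h1 : ((lca : Int) + (k : Int) + 1) = (((lca + k + 1 : Nat)) : Int) := by push_cast; ring
    rw [h1, PySem.List.slice_to_natCast]
    rfl
  rw [hA, PySem.List.slice_to_natCast]
  by_cases hl : 1 ≤ lca
  · have hB := altLoop src (src.length - lca) lca [] hl (by omega)
    dsimp only at hB
    rw [hB]
    simp
  · have hl0 : lca = 0 := by omega
    subst hl0
    cases src with
    | nil =>
      rw [PySem.List.pyRange_one_eq_nil (by simp), List.foldl_nil]
      simp
    | cons s rest =>
      rw [PySem.List.pyRange_one_cons (by exact_mod_cast Nat.succ_pos rest.length),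
        List.foldl_cons]
      dsimp only
      rw [if_pos (show (((0 : Nat) : Int)) = (0 : Int) by norm_num), PySem.List.pyGetD_natCast]
      have hs1 : List.getD (s :: rest) 0 "" = s := rfl
      have ht1 : (s :: rest).take 1 = [s] := rfl
      have hcast : (((0 : Nat) : Int) + 1) = (((1 : Nat)) : Int) := by norm_num
      have hB := altLoop (s :: rest) rest.length 1
        (([] : List String) ++ ["state_" ++ List.getD (s :: rest) 0 "" ++ "_exit"])
        (le_refl 1) (by simp [Nat.add_comm])
      dsimp only at hB
      rw [ht1, str_join_singleton, hs1] at hB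
      rw [hcast, hs1, hB]
      have hlen : (s :: rest).length - 0 = rest.length + 1 := by simp
      have hmap : (List.range (rest.length + 1)).map
            (fun k => "state_" ++ PySem.Str.join "_" ((s :: rest).take (0 + k + 1)) ++ "_exit")
          = ("state_" ++ s ++ "_exit")
              :: (List.range rest.length).map
                  (fun k => "state_" ++ PySem.Str.join "_" ((s :: rest).take (1 + k + 1)) ++ "_exit") := by
        rw [List.range_succ_eq_map, List.map_cons, List.map_map]
        apply congrArg₂ List.cons
        · show "state_" ++ PySem.Str.join "_" ((s :: rest).take (0 + 0 + 1)) ++ "_exit" = _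
          rw [show (0 + 0 + 1 : Nat) = 1 from rfl, ht1, str_join_singleton]
        · apply List.map_congr_left
          intro k hk
          simp only [Function.comp_apply, Nat.succ_eq_add_one]
          rw [show 0 + (k + 1) + 1 = 1 + k + 1 by omega]
      rw [hlen, hmap, List.nil_append]
      rfl
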